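-- pv_equiv track=rewrite | github.com/sumin123/CodingTest | 0909/문자열 압축.py | solution
-- ===== SOURCE A (Python) =====
-- def solution(s):
--     answer = 0
--
--     N = len(s)
--     result = []
--
--     if N == 1:
--         return 1
--
--     # 쪼개는 길이를 늘려가기
--     for i in range(1,N//2+1):
--         word = s[:i]
--         cnt = 0
--         i_result = ''
--         for idx in range(N//i):
--             if word == s[idx*i:idx*i+i]:
--                 cnt += 1
--
--             else:
--                 if cnt > 1:
--                     i_result += (str(cnt) + word)
--                     word = s[idx*i:idx*i+i]
--                     cnt = 1
--                 else:
--                     i_result += word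
--                     word = s[idx*i:idx*i+i]
--                     cnt = 1
--
--         if cnt > 1:
--             i_result += (str(cnt) + word)
--         else:
--             i_result += word
--
--         i_result += s[(N//i-1)*i+i:]
--         result.append(i_result)
--
--
--     result = sorted(result, key=lambda x: len(x))
--     answer = len(result[0])
--     return answer
-- ===== SOURCE B (Python) =====
-- def _clen(s, i):
--     # compressed length for chunk size i, via character mismatch prefix sums:
--     # pref[k] = number of positions p < k with s[p] != s[p+i]; block j repeats
--     # block j-1 iff pref is flat over the block's window, so each block test is O(1).
--     N = len(s)
--     pref = [0]
--     for p in range(N - i):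
--         pref.append(pref[p] + (s[p] != s[p + i]))
--     blocks = N // i
--     # run boundaries: block j starts a new run iff some char in its window mismatches
--     cuts = [0] + [j for j in range(1, blocks) if pref[j * i] > pref[(j - 1) * i]] + [blocks]
--     total = N - blocks * i  # uncompressed tail
--     for a, b in zip(cuts, cuts[1:]):
--         total += i + (len(str(b - a)) if b - a > 1 else 0)
--     return total
--
--
-- def solution(s):
--     N = len(s)
--     if N < 2:
--         return N
--     return min(_clen(s, i) for i in range(1, N // 2 + 1))
-- ===== Notes on version B (the rewrite author's own statement) =====
-- stated objective: alternative
-- what changed: Instead of A's online run-length re-encoding (building every compressed string by slicing and comparing adjacent blocks, then sorting the candidates by length), B precomputes per chunk size a prefix-sum table of character mismatches at shift i, decides per block in O(1) whether it repeats its predecessor (the table is flat over its window), reads the run boundaries off as a cut-position list and sums the compressed length arithmetically over consecutive cut gaps, taking the min of the integer lengths; …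
import Mathlib
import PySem

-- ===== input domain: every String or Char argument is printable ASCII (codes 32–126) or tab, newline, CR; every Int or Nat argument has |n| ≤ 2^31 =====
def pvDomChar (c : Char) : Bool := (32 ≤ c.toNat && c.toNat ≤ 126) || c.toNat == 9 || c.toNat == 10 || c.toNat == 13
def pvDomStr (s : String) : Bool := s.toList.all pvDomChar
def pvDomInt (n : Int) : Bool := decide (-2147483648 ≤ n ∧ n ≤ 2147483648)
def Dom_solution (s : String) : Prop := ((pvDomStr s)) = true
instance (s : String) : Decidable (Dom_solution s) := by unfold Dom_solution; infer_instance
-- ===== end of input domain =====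

-- B replaces A's online run-length string building (and the final sort of all candidate
-- strings) by, per chunk size i, a prefix-sum table of character mismatches at shift i:
-- a block repeats its predecessor iff the table is flat over its window (an O(1) test),
-- run boundaries are read off as cut positions and the compressed length is summed over
-- consecutive cut gaps. Pre_ excludes the empty string, on which A raises IndexError.


-- ===== PORT A =====
-- A's inner loop body: state (word, cnt, i_result)
def stepA (cs : List Char) (i : Int) (st : List Char × Int × List Char) (idx : Int) :
    List Char × Int × List Char :=
  let (word, cnt, ires) := st
  let b := PySem.List.slice cs (some (idx * i)) (some (idx * i + i))
  if word == b then (word, cnt + 1, ires)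
  else if cnt > 1 then (b, 1, ires ++ PySem.Int.toChars cnt ++ word)
  else (b, 1, ires ++ word)

-- the i_result string A builds for one split size i
def innerA (cs : List Char) (i : Int) : List Char :=
  let N : Int := cs.length
  let M := PySem.Int.floordiv N i
  let (word, cnt, ires) :=
    (PySem.List.pyRange 0 M 1).foldl (stepA cs i) (PySem.List.slice cs none (some i), 0, [])
  let ires := if cnt > 1 then ires ++ PySem.Int.toChars cnt ++ word else ires ++ word
  ires ++ PySem.List.slice cs (some ((M - 1) * i + i)) none

def solution (s : String) : Int :=
  let cs := s.toList
  let N : Int := cs.length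
  if N == 1 then 1
  else
    let result := (PySem.List.pyRange 1 (PySem.Int.floordiv N 2 + 1) 1).foldl
      (fun r i => r ++ [innerA cs i]) []
    let sortedr := PySem.List.sorted result (fun x => (x.length : Int)) false
    (((PySem.List.pyGet? sortedr 0).getD []).length : Int)

-- ===== PORT B =====
-- len(str(d)) if d > 1 else 0 : cost of one run of d blocks beyond the blocks themselves
def costB (d : Int) : Int := if d > 1 then ((PySem.Int.toChars d).length : Int) else 0

-- pref[k] = number of p < k with s[p] != s[p+i]  (pref[p] access is exact: p < len(pref);
-- s[p], s[p+i] are exact: both indices are in range for p in range(N-i))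
def prefB (cs : List Char) (i : Int) : List Int :=
  (PySem.List.pyRange 0 ((cs.length : Int) - i) 1).foldl
    (fun pr p =>
      pr ++ [PySem.List.pyGetD pr p 0 +
        (if PySem.List.pyGet? cs p != PySem.List.pyGet? cs (p + i) then 1 else 0)])
    [0]

-- cuts = [0] + [j in 1..blocks-1 with a mismatch inside block j's window] + [blocks]
def cutsB (cs : List Char) (i blocks : Int) : List Int :=
  [0] ++ (PySem.List.pyRange 1 blocks 1).filter
      (fun j => decide (PySem.List.pyGetD (prefB cs i) (j * i) 0 >
                        PySem.List.pyGetD (prefB cs i) ((j - 1) * i) 0))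
    ++ [blocks]

-- _clen: compressed length for chunk size i, summed over consecutive cut gaps
def clenB (cs : List Char) (i : Int) : Int :=
  let N : Int := cs.length
  let blocks := PySem.Int.floordiv N i
  let cuts := cutsB cs i blocks
  (cuts.zip (PySem.List.slice cuts (some 1) none)).foldl
    (fun total ab => total + i + costB (ab.2 - ab.1)) (N - blocks * i)

def solution_alt (s : String) : Int :=
  let cs := s.toList
  let N : Int := cs.length
  if N < 2 then N
  else (PySem.List.min? ((PySem.List.pyRange 1 (PySem.Int.floordiv N 2 + 1) 1).map (clenB cs))
          (fun x => x)).getD 0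

-- ===== PRECONDITION & SPEC =====
-- A raises IndexError on the empty string (result[0] of an empty list); Pre_ excludes exactly it.
def Pre_solution (s : String) : Prop := s ≠ ""
instance (s : String) : Decidable (Pre_solution s) := by unfold Pre_solution; infer_instance
def pvWitness_solution : String := "aabbaccc"

def Spec_solution (s : String) (out : Int) : Prop := out = solution_alt s
instance (s : String) (out : Int) : Decidable (Spec_solution s out) := by unfold Spec_solution; infer_instance

-- ===== CLAIM (what is proved, stated in full; the proofs are below) =====
def Claim_equal_solution : Prop := ∀ (s : String), Dom_solution s → Pre_solution s → Spec_solution s (solution s)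

-- ===== LEMMAS AND PROOFS =====

-- proof-internal reference machine: the classic online RLE length state machine over blocks
def digitsB (c : Int) : Int := ((PySem.Int.toChars c).length : Int)

def stepI (cs : List Char) (i : Int) (st : Int × Int) (j : Int) : Int × Int :=
  let (total, cnt) := st
  if PySem.List.slice cs (some (j * i)) (some ((j + 1) * i)) ==
     PySem.List.slice cs (some ((j - 1) * i)) (some (j * i)) then (total, cnt + 1)
  else (total + i + (if cnt > 1 then digitsB cnt else 0), 1)

def clenI (cs : List Char) (i : Int) : Int :=
  let N : Int := cs.length
  let blocks := PySem.Int.floordiv N i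
  let (total, cnt) := (PySem.List.pyRange 1 blocks 1).foldl (stepI cs i) (N - blocks * i, 1)
  total + i + (if cnt > 1 then digitsB cnt else 0)

-- loop invariant: A's fold state (word, cnt, i_result) vs the machine state (total, cnt);
-- word is the (m-1)-th block, the machine's total exceeds its start by i_result's length
theorem loop_inv (cs : List Char) (i : Nat) (hi : 1 ≤ i) :
    ∀ m : Nat, 1 ≤ m → m ≤ cs.length / i →
    ∃ (c : Int) (r : List Char), 1 ≤ c ∧
      (PySem.List.pyRange 0 (m : Int) 1).foldl (stepA cs (i : Int))
          (PySem.List.slice cs none (some (i : Int)), 0, [])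
        = ((cs.drop ((m - 1) * i)).take i, c, r) ∧
      ∀ t0 : Int, (PySem.List.pyRange 1 (m : Int) 1).foldl (stepI cs (i : Int)) (t0, 1)
        = (t0 + r.length, c) := by
  intro m hm
  induction m, hm using Nat.le_induction with
  | base =>
    intro _
    refine ⟨1, [], le_refl 1, ?_, ?_⟩
    · have h0 : PySem.List.pyRange 0 (1:Int) 1 = [0] := by decide
      rw [Nat.cast_one, h0]
      simp [stepA, PySem.List.slice_to_natCast]
    · have h1 : PySem.List.pyRange 1 (1:Int) 1 = [] := by decide
      intro t0; rw [Nat.cast_one, h1]; simp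
  | succ m hm ih =>
    intro hle
    obtain ⟨k, rfl⟩ : ∃ k, m = k + 1 := ⟨m - 1, by omega⟩
    obtain ⟨c, r, hc, hA, hB⟩ := ih (by omega)
    have hdm : (cs.length / i) * i ≤ cs.length := Nat.div_mul_le_self _ _
    have hfit : (k + 2) * i ≤ cs.length :=
      le_trans (Nat.mul_le_mul_right i hle) hdm
    have hsplit : (k + 2) * i = (k+1) * i + i := by ring
    have hsplit' : (k + 1) * i = k * i + i := by ring
    have hlenw : ((cs.drop ((k+1) * i)).take i).length = i := by
      simp only [List.length_take, List.length_drop]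
      omega
    have e1 : ((k+1:Nat) : Int) * (i : Int) = (((k+1)*i : Nat) : Int) := by push_cast; ring
    have e2 : (((k+1)*i : Nat) : Int) + (i : Int) = (((k+2)*i : Nat) : Int) := by push_cast; ring
    have e3 : (((k+1:Nat) : Int) + 1) * (i : Int) = (((k+2)*i : Nat) : Int) := by push_cast; ring
    have e4 : (((k+1:Nat) : Int) - 1) * (i : Int) = ((k*i : Nat) : Int) := by push_cast; ring
    have hsliceA : PySem.List.slice cs (some (((k+1:Nat) : Int) * (i:Int)))
        (some (((k+1:Nat) : Int) * (i:Int) + (i:Int))) = (cs.drop ((k+1)*i)).take i := by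
      rw [e1, PySem.List.slice_natCast_add]
    have hsliceB1 : PySem.List.slice cs (some (((k+1:Nat) : Int) * (i:Int)))
        (some ((((k+1:Nat) : Int) + 1) * (i:Int))) = (cs.drop ((k+1)*i)).take i := by
      rw [e1, e3, PySem.List.slice_natCast]
      have : (k+2)*i - (k+1)*i = i := by omega
      rw [this]
    have hsliceB2 : PySem.List.slice cs (some ((((k+1:Nat) : Int) - 1) * (i:Int)))
        (some (((k+1:Nat) : Int) * (i:Int))) = (cs.drop (k*i)).take i := by
      rw [e4, e1, PySem.List.slice_natCast]
      have : (k+1)*i - k*i = i := by omega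
      rw [this]
    have hc1 : ((k+1+1 : Nat) : Int) = ((k+1 : Nat) : Int) + 1 := by push_cast; ring
    have hrA : PySem.List.pyRange 0 ((k+1+1 : Nat) : Int) 1
        = PySem.List.pyRange 0 ((k+1 : Nat) : Int) 1 ++ [((k+1:Nat) : Int)] := by
      rw [hc1, PySem.List.pyRange_one_succ_right (by positivity)]
    have hrB : PySem.List.pyRange 1 ((k+1+1 : Nat) : Int) 1
        = PySem.List.pyRange 1 ((k+1 : Nat) : Int) 1 ++ [((k+1:Nat) : Int)] := by
      rw [hc1, PySem.List.pyRange_one_succ_right (by exact_mod_cast Nat.one_le_iff_ne_zero.mpr (by omega))]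
    rw [hrA]
    by_cases hcmp : (cs.drop (k*i)).take i = (cs.drop ((k+1)*i)).take i
    · refine ⟨c + 1, r, by omega, ?_, ?_⟩
      · rw [List.foldl_append, hA]
        simp only [List.foldl, stepA, hsliceA]
        simp [hcmp]
      · intro t0
        rw [hrB, List.foldl_append, hB]
        simp only [List.foldl, stepI, hsliceB1, hsliceB2]
        simp [hcmp]
    · refine ⟨1, r ++ (if c > 1 then PySem.Int.toChars c ++ (cs.drop (k*i)).take i
          else (cs.drop (k*i)).take i), le_refl 1, ?_, ?_⟩
      · rw [List.foldl_append, hA]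
        simp only [List.foldl, stepA, hsliceA]
        by_cases hc1 : c > 1 <;> simp [hcmp, hc1]
      · intro t0
        rw [hrB, List.foldl_append, hB]
        simp only [List.foldl, stepI, hsliceB1, hsliceB2]
        have hlenw' : ((cs.drop (k * i)).take i).length = i := by
          simp only [List.length_take, List.length_drop]
          omega
        by_cases hc1 : c > 1
        · simp [Ne.symm hcmp, hc1, digitsB, hlenw', List.length_append]
          ring
        · simp [Ne.symm hcmp, hc1, hlenw', List.length_append]
          ring

-- per split size, the length of A's compressed string equals the machine's length
theorem innerA_len (cs : List Char) (i : Nat) (hi : 1 ≤ i) (h2i : 2 * i ≤ cs.length) :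
    ((innerA cs (i : Int)).length : Int) = clenI cs (i : Int) := by
  have hM2 : 2 ≤ cs.length / i := (Nat.le_div_iff_mul_le (by omega)).mpr (by omega)
  obtain ⟨c, r, hc, hA, hB⟩ := loop_inv cs i hi (cs.length / i) (by omega) (le_refl _)
  have hdm : (cs.length / i) * i ≤ cs.length := Nat.div_mul_le_self _ _
  have hfd : PySem.Int.floordiv ((cs.length : Int)) ((i : Int)) = ((cs.length / i : Nat) : Int) :=
    PySem.Int.floordiv_natCast _ _
  have etail : (((cs.length / i : Nat) : Int) - 1) * (i : Int) + (i : Int)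
      = ((cs.length / i * i : Nat) : Int) := by push_cast; ring
  simp only [innerA, clenI, hfd]
  rw [hA, hB]
  rw [etail, PySem.List.slice_from_natCast]
  have hlenw : ((cs.drop ((cs.length / i - 1) * i)).take i).length = i := by
    have hsplit : cs.length / i * i = (cs.length / i - 1) * i + i := by
      have h1 : cs.length / i = (cs.length / i - 1) + 1 := by omega
      nth_rewrite 1 [h1]; ring
    simp only [List.length_take, List.length_drop]
    omega
  have hsub : ((cs.length - cs.length / i * i : Nat) : Int)
      = (cs.length : Int) - ((cs.length / i : Nat) : Int) * (i : Int) := by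
    rw [Nat.cast_sub hdm, Nat.cast_mul]
  by_cases hc1 : c > 1 <;>
    simp only [hc1, if_true, if_false, List.length_append, List.length_drop, digitsB, hlenw] <;>
    push_cast [hsub] <;> ring

-- head-of-sorted-by-length equals min of the lengths
theorem sorted_head_min (xs : List (List Char)) (hne : xs ≠ []) :
    ((((PySem.List.pyGet? (PySem.List.sorted xs (fun x => (x.length : Int)) false) 0).getD []).length : Int))
      = (PySem.List.min? (xs.map (fun x => (x.length : Int))) (fun x => x)).getD 0 := by
  obtain ⟨m, t, hs⟩ : ∃ m t, PySem.List.sorted xs (fun x => (x.length : Int)) false = m :: t := by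
    rcases h : PySem.List.sorted xs (fun x => (x.length : Int)) false with _ | ⟨m, t⟩
    · exact absurd ((PySem.List.sorted_eq_nil_iff _ _ _).mp h) hne
    · exact ⟨m, t, rfl⟩
  have hmmem : m ∈ xs := by
    have := (PySem.List.mem_sorted xs (fun x => (x.length : Int)) false m).mp
    rw [hs] at this; exact this (by simp)
  have hmin : ∀ y ∈ xs, (m.length : Int) ≤ (y.length : Int) :=
    PySem.List.key_head_sorted_le xs (fun x => (x.length : Int)) hs
  obtain ⟨v, hv⟩ : ∃ v, PySem.List.min? (xs.map (fun x => (x.length : Int))) (fun x => x) = some v := by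
    rcases h : PySem.List.min? (xs.map (fun x => (x.length : Int))) (fun x => x) with _ | v
    · rw [PySem.List.min?_eq_none_iff] at h; simp at h; exact absurd h hne
    · exact ⟨v, h⟩
  have hvmem := PySem.List.min?_mem hv
  have hvmin := PySem.List.min?_isMin hv
  rw [hs, hv]
  simp only [PySem.List.pyGet?]
  obtain ⟨y, hy, rfl⟩ := List.mem_map.mp hvmem
  have h1 : (m.length : Int) ≤ (y.length : Int) := hmin y hy
  have h2 : (y.length : Int) ≤ (m.length : Int) := hvmin _ (List.mem_map_of_mem hmmem)
  simp only [PySem.List.pyIdx?]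
  norm_num
  omega

-- ===== B side: pref characterisation, cuts, and the gap-sum = machine =====

-- the mismatch test the port's pref loop performs at position p
def mismP (cs : List Char) (i p : Int) : Bool :=
  PySem.List.pyGet? cs p != PySem.List.pyGet? cs (p + i)

-- number of mismatches s[p] != s[p+i] among p < k
def cntM (cs : List Char) (i : Int) (k : Nat) : Int :=
  ((List.range k).countP (fun (p : Nat) => mismP cs i (p : Int)) : Int)

-- window decomposition of the mismatch count
theorem cntM_window (cs : List Char) (i : Int) (a w : Nat) :
    cntM cs i (a + w) = cntM cs i a +
      (((List.range w).countP (fun (q : Nat) => mismP cs i ((a + q : Nat) : Int))) : Int) := by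
  simp only [cntM, List.range_add, List.countP_append, List.countP_map, Nat.cast_add]
  congr 1

-- equality of the two adjacent windows ↔ no mismatch inside the left window
theorem window_eq_iff (cs : List Char) (i a : Nat) :
    ((cs.drop a).take i = (cs.drop (a + i)).take i) ↔
      (∀ q < i, ¬ (mismP cs (i : Int) ((a + q : Nat) : Int) = true)) := by
  have key : ∀ q : Nat, (¬ (mismP cs (i : Int) ((a + q : Nat) : Int) = true)) ↔
      cs[a + q]? = cs[a + q + i]? := by
    intro q
    have e : ((a + q : Nat) : Int) + (i : Int) = ((a + q + i : Nat) : Int) := by push_cast; ring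
    rw [mismP, e, PySem.List.pyGet?_natCast, PySem.List.pyGet?_natCast]
    simp [bne_iff_ne]
  constructor
  · intro he q hq
    rw [key]
    have := congrArg (fun l => l[q]?) he
    simp only [List.getElem?_take, List.getElem?_drop, hq, if_pos] at this
    rw [show a + i + q = a + q + i from by omega] at this
    exact this
  · intro hq
    apply List.ext_getElem?
    intro n
    simp only [List.getElem?_take, List.getElem?_drop]
    by_cases hn : n < i
    · simp only [hn, if_pos]
      have := (key n).mp (hq n hn)
      rw [show a + i + n = a + n + i from by omega]
      exact this
    · simp [hn]

-- the mismatch count grows over a window iff some position in it mismatches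
theorem cnt_pos_iff (cs : List Char) (i : Int) (a w : Nat) :
    (cntM cs i a < cntM cs i (a + w)) ↔
      ∃ q < w, mismP cs i ((a + q : Nat) : Int) = true := by
  rw [cntM_window]
  constructor
  · intro hlt
    have : 0 < (List.range w).countP (fun (q : Nat) => mismP cs i ((a + q : Nat) : Int)) := by
      by_contra hz
      omega
    obtain ⟨q, hq, hm⟩ := List.countP_pos_iff.mp this
    exact ⟨q, List.mem_range.mp hq, hm⟩
  · intro ⟨q, hq, hm⟩
    have : 0 < (List.range w).countP (fun (q : Nat) => mismP cs i ((a + q : Nat) : Int)) :=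
      List.countP_pos_iff.mpr ⟨q, List.mem_range.mpr hq, hm⟩
    omega

-- the pref list the port builds is exactly [cntM 0, cntM 1, …]
theorem prefB_fold (cs : List Char) (i : Int) (K : Nat) :
    (PySem.List.pyRange 0 (K : Int) 1).foldl
      (fun pr p =>
        pr ++ [PySem.List.pyGetD pr p 0 +
          (if PySem.List.pyGet? cs p != PySem.List.pyGet? cs (p + i) then 1 else 0)])
      [0]
      = (List.range (K + 1)).map (fun k => cntM cs i k) := by
  induction K with
  | zero =>
    simp [PySem.List.pyRange_one_eq_nil, cntM]
  | succ K ih =>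
    have hc : ((K+1 : Nat) : Int) = (K : Int) + 1 := by push_cast; ring
    rw [hc, PySem.List.pyRange_one_succ_right (by positivity), List.foldl_append, ih]
    simp only [List.foldl_cons, List.foldl_nil]
    have hget : PySem.List.pyGetD ((List.range (K+1)).map (fun k => cntM cs i k)) (K : Int) 0
        = cntM cs i K := by
      rw [PySem.List.pyGetD_natCast, List.getD_eq_getElem?_getD]
      simp
    rw [hget]
    have hstep : cntM cs i K +
        (if PySem.List.pyGet? cs (K : Int) != PySem.List.pyGet? cs ((K : Int) + i) then 1 else 0)
        = cntM cs i (K+1) := by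
      simp [cntM, List.range_succ, List.countP_append, List.countP_cons, mismP]
    rw [hstep]
    simp [List.range_succ]

theorem prefB_eq (cs : List Char) (i : Nat) (hi : i ≤ cs.length) :
    prefB cs (i : Int) = (List.range (cs.length - i + 1)).map (fun k => cntM cs (i : Int) k) := by
  rw [prefB, show (cs.length : Int) - (i : Int) = ((cs.length - i : Nat) : Int) from by
    push_cast [hi]; ring]
  exact prefB_fold cs (i : Int) (cs.length - i)

-- the port's cut test at block j equals "block j differs from block j-1"
theorem cut_test_iff (cs : List Char) (i : Nat) (j : Nat) (hj : 1 ≤ j)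
    (hfit : (j + 1) * i ≤ cs.length) :
    (decide (PySem.List.pyGetD (prefB cs (i : Int)) ((j : Int) * (i : Int)) 0 >
             PySem.List.pyGetD (prefB cs (i : Int)) (((j : Int) - 1) * (i : Int)) 0))
      = !((cs.drop (j * i)).take i == (cs.drop ((j-1) * i)).take i) := by
  have hiN : i ≤ cs.length := by nlinarith
  have e1 : (j : Int) * (i : Int) = ((j * i : Nat) : Int) := by push_cast; ring
  have e2 : ((j : Int) - 1) * (i : Int) = (((j - 1) * i : Nat) : Int) := by
    push_cast [hj]; ring
  have hb1 : j * i < cs.length - i + 1 := by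
    have : j * i + i ≤ cs.length := by nlinarith
    omega
  have hb2 : (j - 1) * i < cs.length - i + 1 := by
    have : (j-1) * i ≤ j * i := Nat.mul_le_mul_right i (by omega)
    omega
  have hv : ∀ k : Nat, k < cs.length - i + 1 →
      PySem.List.pyGetD (prefB cs (i : Int)) ((k : Nat) : Int) 0 = cntM cs (i : Int) k := by
    intro k hk
    rw [prefB_eq cs i hiN, PySem.List.pyGetD_natCast, List.getD_eq_getElem?_getD]
    simp [hk]
  rw [e1, e2, hv _ hb1, hv _ hb2]
  have hsplit : j * i = (j - 1) * i + i := by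
    have : j = (j - 1) + 1 := by omega
    nth_rewrite 1 [this]; ring
  rw [hsplit]
  have hbeq : ((cs.drop ((j-1) * i + i)).take i == (cs.drop ((j-1) * i)).take i)
      = decide ((cs.drop ((j-1)*i)).take i = (cs.drop ((j-1)*i + i)).take i) := by
    simp [eq_comm, Bool.beq_eq_decide_eq]
  rw [hbeq, ← decide_not]
  apply decide_eq_decide.mpr
  rw [gt_iff_lt, cnt_pos_iff cs (i:Int) ((j-1)*i) i, window_eq_iff cs i ((j-1)*i)]
  push Not
  exact Iff.rfl

-- gap-cost accumulator over consecutive cut pairs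
def goP (i : Int) : Int → List Int → Int
  | _, [] => 0
  | a, b :: r => i + costB (b - a) + goP i b r

theorem goP_append_last (i a x : Int) (L : List Int) :
    goP i a (L ++ [x]) = goP i a L + i + costB (x - L.getLastD a) := by
  induction L generalizing a with
  | nil => simp [goP]; try ring
  | cons b r ih => simp only [List.cons_append, goP, ih]
                   cases r <;> simp [List.getLastD] <;> try ring

theorem zip_foldl_goP (i : Int) (x : Int) (xs : List Int) (t : Int) :
    (List.zip (x :: xs) xs).foldl (fun total ab => total + i + costB (ab.2 - ab.1)) t
      = t + goP i x xs := by
  induction xs generalizing x t with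
  | nil => simp [goP]
  | cons b r ih => simp only [List.zip_cons_cons, List.foldl_cons, goP, ih]; ring

-- the machine fold equals "t0 + gap sum of the filtered cut list", with the run count tracked
theorem machine_cuts (cs : List Char) (i : Nat) (hi : 1 ≤ i) :
    ∀ m : Nat, 1 ≤ m → m ≤ cs.length / i →
    ∀ t0 : Int,
      (PySem.List.pyRange 1 (m : Int) 1).foldl (stepI cs (i : Int)) (t0, 1)
        = (t0 + goP (i : Int) 0 ((PySem.List.pyRange 1 (m : Int) 1).filter
              (fun j => decide (PySem.List.pyGetD (prefB cs (i : Int)) (j * (i : Int)) 0 >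
                                PySem.List.pyGetD (prefB cs (i : Int)) ((j - 1) * (i : Int)) 0))),
           (m : Int) - ((PySem.List.pyRange 1 (m : Int) 1).filter
              (fun j => decide (PySem.List.pyGetD (prefB cs (i : Int)) (j * (i : Int)) 0 >
                                PySem.List.pyGetD (prefB cs (i : Int)) ((j - 1) * (i : Int)) 0))).getLastD 0) := by
  intro m hm
  induction m, hm using Nat.le_induction with
  | base =>
    intro _ t0
    have h1 : PySem.List.pyRange 1 (1:Int) 1 = [] := by decide
    rw [Nat.cast_one, h1]
    simp [goP]
  | succ m hm ih =>
    intro hle t0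
    have hdm : (cs.length / i) * i ≤ cs.length := Nat.div_mul_le_self _ _
    have hfit : (m + 1) * i ≤ cs.length := le_trans (Nat.mul_le_mul_right i hle) hdm
    have hc1 : ((m+1 : Nat) : Int) = ((m : Nat) : Int) + 1 := by push_cast; ring
    have hr : PySem.List.pyRange 1 ((m+1 : Nat) : Int) 1
        = PySem.List.pyRange 1 ((m : Nat) : Int) 1 ++ [((m:Nat) : Int)] := by
      rw [hc1, PySem.List.pyRange_one_succ_right
        (by exact_mod_cast Nat.one_le_iff_ne_zero.mpr (by omega))]
    have hs1 : PySem.List.slice cs (some (((m:Nat) : Int) * (i:Int)))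
        (some ((((m:Nat) : Int) + 1) * (i:Int))) = (cs.drop (m*i)).take i := by
      rw [show (((m:Nat) : Int) * (i:Int)) = (((m*i : Nat)) : Int) from by push_cast; ring,
          show ((((m:Nat) : Int) + 1) * (i:Int)) = (((m+1)*i : Nat) : Int) from by push_cast; ring,
          PySem.List.slice_natCast]
      rw [show (m+1)*i - m*i = i from by rw [Nat.succ_mul]; omega]
    have hs2 : PySem.List.slice cs (some ((((m:Nat) : Int) - 1) * (i:Int)))
        (some (((m:Nat) : Int) * (i:Int))) = (cs.drop ((m-1)*i)).take i := by
      rw [show ((((m:Nat) : Int) - 1) * (i:Int)) = (((m-1)*i : Nat) : Int) from by push_cast [hm]; ring,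
          show (((m:Nat) : Int) * (i:Int)) = ((m*i : Nat) : Int) from by push_cast; ring,
          PySem.List.slice_natCast]
      rw [show m*i - (m-1)*i = i from by
        have : (m-1)*i + i = m*i := by
          have h1 : m = (m - 1) + 1 := by omega
          nth_rewrite 2 [h1]; ring
        omega]
    have hcut := cut_test_iff cs i m hm hfit
    rw [hr, List.foldl_append, List.filter_append, ih (by omega) t0]
    simp only [List.foldl_cons, List.foldl_nil, List.filter_cons, List.filter_nil]
    by_cases hcmp : (cs.drop (m*i)).take i = (cs.drop ((m-1)*i)).take i
    · have hpred : (decide (PySem.List.pyGetD (prefB cs (i : Int)) (((m:Nat):Int) * (i : Int)) 0 >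
          PySem.List.pyGetD (prefB cs (i : Int)) ((((m:Nat):Int) - 1) * (i : Int)) 0)) = false := by
        rw [hcut]; simp [hcmp]
      simp only [stepI, hs1, hs2, hpred]
      rw [if_pos (by simp [hcmp])]
      simp only [Bool.false_eq_true, if_false, List.append_nil]
      refine Prod.ext ?_ (by push_cast; ring)
      rfl
    · have hpred : (decide (PySem.List.pyGetD (prefB cs (i : Int)) (((m:Nat):Int) * (i : Int)) 0 >
          PySem.List.pyGetD (prefB cs (i : Int)) ((((m:Nat):Int) - 1) * (i : Int)) 0)) = true := by
        rw [hcut]; simp [hcmp]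
      simp only [stepI, hs1, hs2, hpred]
      rw [if_neg (by simp [hcmp])]
      simp only [if_true, goP_append_last, List.getLastD_concat]
      refine Prod.ext ?_ (by push_cast; ring)
      simp only [costB, digitsB]
      ring

-- per split size, the port's gap-sum length equals the machine's length
theorem clenB_eq_clenI (cs : List Char) (i : Nat) (hi : 1 ≤ i) (h2i : 2 * i ≤ cs.length) :
    clenB cs (i : Int) = clenI cs (i : Int) := by
  have hM2 : 2 ≤ cs.length / i := (Nat.le_div_iff_mul_le (by omega)).mpr (by omega)
  have hfd : PySem.Int.floordiv ((cs.length : Int)) ((i : Int)) = ((cs.length / i : Nat) : Int) :=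
    PySem.Int.floordiv_natCast _ _
  simp only [clenB, clenI, cutsB, hfd]
  rw [machine_cuts cs i hi (cs.length / i) (by omega) (le_refl _)]
  have htail : PySem.List.slice
      (([0] ++ (PySem.List.pyRange 1 ((cs.length / i : Nat) : Int) 1).filter
          (fun j => decide (PySem.List.pyGetD (prefB cs (i:Int)) (j * (i:Int)) 0 >
                            PySem.List.pyGetD (prefB cs (i:Int)) ((j - 1) * (i:Int)) 0))
        ++ [((cs.length / i : Nat) : Int)]))
      (some 1) none
      = (PySem.List.pyRange 1 ((cs.length / i : Nat) : Int) 1).filter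
          (fun j => decide (PySem.List.pyGetD (prefB cs (i:Int)) (j * (i:Int)) 0 >
                            PySem.List.pyGetD (prefB cs (i:Int)) ((j - 1) * (i:Int)) 0))
        ++ [((cs.length / i : Nat) : Int)] := by
    rw [PySem.List.slice_from_one]
    rfl
  rw [htail]
  rw [show (([0] ++ (PySem.List.pyRange 1 ((cs.length / i : Nat) : Int) 1).filter
          (fun j => decide (PySem.List.pyGetD (prefB cs (i:Int)) (j * (i:Int)) 0 >
                            PySem.List.pyGetD (prefB cs (i:Int)) ((j - 1) * (i:Int)) 0))
        ++ [((cs.length / i : Nat) : Int)]))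
      = (0 : Int) :: ((PySem.List.pyRange 1 ((cs.length / i : Nat) : Int) 1).filter
          (fun j => decide (PySem.List.pyGetD (prefB cs (i:Int)) (j * (i:Int)) 0 >
                            PySem.List.pyGetD (prefB cs (i:Int)) ((j - 1) * (i:Int)) 0))
        ++ [((cs.length / i : Nat) : Int)]) from rfl]
  rw [zip_foldl_goP, goP_append_last]
  simp only [costB, digitsB, List.getLastD]
  ring

-- ===== VERDICT (by name: the statement is the Claim_ definition above) =====
theorem solution_spec : Claim_equal_solution := by
  intro s _ hpre
  unfold Spec_solution solution solution_alt
  have hne : s.toList ≠ [] := by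
    intro h
    exact hpre (String.toList_eq_nil_iff.mp h)
  have hlen1 : 1 ≤ s.toList.length := by
    cases h : s.toList with
    | nil => exact absurd h hne
    | cons a t => simp
  by_cases h1 : s.toList.length = 1
  · simp [h1]
  · have h2 : 2 ≤ s.toList.length := by omega
    have hbeq : (((s.toList.length : Int)) == 1) = false := by
      have : ((s.toList.length : Int)) ≠ 1 := by exact_mod_cast (by omega : s.toList.length ≠ 1)
      simpa using this
    have hlt : ¬ ((s.toList.length : Int) < 2) := not_lt.mpr (by exact_mod_cast h2)
    simp only [hbeq, hlt, if_false, Bool.false_eq_true]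
    have hfd2 : PySem.Int.floordiv ((s.toList.length : Int)) 2
        = ((s.toList.length / 2 : Nat) : Int) := by
      exact_mod_cast PySem.Int.floordiv_natCast s.toList.length 2
    rw [hfd2]
    rw [PySem.List.foldl_append_singleton_eq_map (innerA s.toList) _ []]
    have hrne : PySem.List.pyRange 1 (((s.toList.length / 2 : Nat) : Int) + 1) 1 ≠ [] := by
      rw [PySem.List.pyRange_one_cons (by
        have : 1 ≤ s.toList.length / 2 := by omega
        have : (1 : Int) ≤ ((s.toList.length / 2 : Nat) : Int) := by exact_mod_cast this
        omega)]
      simp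
    rw [List.nil_append, sorted_head_min _ (by
      intro h
      exact hrne (List.map_eq_nil_iff.mp h))]
    rw [List.map_map]
    have hmaps : (PySem.List.pyRange 1 (((s.toList.length / 2 : Nat) : Int) + 1) 1).map
          ((fun (x : List Char) => ((x.length : Int))) ∘ innerA s.toList)
        = (PySem.List.pyRange 1 (((s.toList.length / 2 : Nat) : Int) + 1) 1).map
          (clenB s.toList) := by
      apply List.map_congr_left
      intro i hi
      simp only [Function.comp_apply]
      obtain ⟨hi1, hi2⟩ := PySem.List.mem_pyRange_one.mp hi
      obtain ⟨j, rfl⟩ : ∃ j : Nat, i = (j : Int) := ⟨i.toNat, by omega⟩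
      have hj1 : 1 ≤ j := by exact_mod_cast hi1
      have hj2 : j ≤ s.toList.length / 2 := by
        have : (j : Int) ≤ ((s.toList.length / 2 : Nat) : Int) := by omega
        exact_mod_cast this
      have hdm2 : s.toList.length / 2 * 2 ≤ s.toList.length := Nat.div_mul_le_self _ _
      rw [innerA_len s.toList j hj1 (by omega), clenB_eq_clenI s.toList j hj1 (by omega)]
    rw [hmaps]
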